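-- pv_equiv track=rewrite | github.com/sNikip/KRep | SudokuSAT/sat_solver James.py | minClauses
-- ===== SOURCE A (Python) =====
-- def minClauses(clauses):
-- 	minClauses = []
-- 	size = -1
--
-- 	for clause in clauses:
-- 		csize = len(clause)
--
-- 		# Either the current clause is smaller
-- 		if size == -1 or csize < size:
-- 			minClauses = [clause]
-- 			size = csize
--
-- 		# Or it is of minimum size as well
-- 		elif csize == size:
-- 			minClauses.append(clause)
--
-- 	return minClauses
-- ===== SOURCE B (Python) =====
-- def minClauses(clauses):
-- 	if not clauses:
-- 		return []
-- 	m = min(len(c) for c in clauses)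
-- 	return [c for c in clauses if len(c) == m]
-- ===== Notes on version B (the rewrite author's own statement) =====
-- stated objective: simpler
-- what changed: Replaces A's single running-minimum scan with mutable best-list state by a reduce-then-filter decomposition: compute the minimum length with min(), then filter the clauses of that length.
import Mathlib
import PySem

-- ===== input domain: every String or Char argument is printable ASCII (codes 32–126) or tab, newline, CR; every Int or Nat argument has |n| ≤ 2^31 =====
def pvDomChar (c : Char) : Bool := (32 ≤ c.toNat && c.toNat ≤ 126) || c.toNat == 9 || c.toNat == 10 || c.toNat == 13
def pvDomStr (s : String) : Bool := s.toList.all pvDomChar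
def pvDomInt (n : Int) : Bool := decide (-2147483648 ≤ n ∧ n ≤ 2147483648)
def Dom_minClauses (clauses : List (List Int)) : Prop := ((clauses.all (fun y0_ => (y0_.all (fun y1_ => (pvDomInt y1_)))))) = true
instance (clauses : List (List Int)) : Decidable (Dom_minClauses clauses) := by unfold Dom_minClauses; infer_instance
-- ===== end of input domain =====

-- B replaces A's single running-minimum scan by a reduce-then-filter decomposition (min length, then filter); objective: simpler.


-- ===== PORT A =====
-- A's loop: running best list and running size (-1 = unset), folded left over the clauses.
def stepA (st : List (List Int) × Int) (clause : List Int) : List (List Int) × Int :=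
  let csize : Int := clause.length
  if st.2 = -1 ∨ csize < st.2 then ([clause], csize)
  else if csize = st.2 then (st.1 ++ [clause], st.2)
  else st

def minClauses (clauses : List (List Int)) : List (List Int) :=
  (clauses.foldl stepA ([], -1)).1

-- ===== PORT B =====
-- min(len(c) for c in clauses) on a nonempty list: fold of min starting from the head's length.
def minLen (c0 : List Int) (cs : List (List Int)) : Int :=
  cs.foldl (fun a x => min a (x.length : Int)) (c0.length : Int)

def minClauses_alt (clauses : List (List Int)) : List (List Int) :=
  match clauses with
  | [] => []
  | c0 :: cs =>
    let m := minLen c0 cs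
    clauses.filter (fun x => (x.length : Int) = m)

-- ===== PRECONDITION & SPEC =====
def Spec_minClauses (clauses : List (List Int)) (out : List (List Int)) : Prop := out = minClauses_alt clauses
instance (clauses : List (List Int)) (out : List (List Int)) : Decidable (Spec_minClauses clauses out) := by unfold Spec_minClauses; infer_instance

-- ===== CLAIM (what is proved, stated in full; the proofs are below) =====
def Claim_equal_minClauses : Prop := ∀ (clauses : List (List Int)), Dom_minClauses clauses → Spec_minClauses clauses (minClauses clauses)

-- ===== LEMMAS AND PROOFS =====

theorem minLen_nonneg (c0 : List Int) (cs : List (List Int)) : 0 ≤ minLen c0 cs := by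
  unfold minLen
  induction cs generalizing c0 with
  | nil => simp
  | cons c cs ih =>
    simp only [List.foldl_cons]
    rcases le_total (c0.length : Int) (c.length : Int) with h | h
    · simpa [min_eq_left h] using ih c0
    · simpa [min_eq_right h] using ih c

theorem minLen_append (c0 : List Int) (cs : List (List Int)) (c : List Int) :
    minLen c0 (cs ++ [c]) = min (minLen c0 cs) (c.length : Int) := by
  unfold minLen; rw [List.foldl_append]; rfl

theorem foldl_min_le_init (a : Int) (cs : List (List Int)) :
    List.foldl (fun a x => min a (x.length : Int)) a cs ≤ a := by
  induction cs generalizing a with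
  | nil => simp
  | cons c cs ih =>
    simp only [List.foldl_cons]
    exact le_trans (ih _) (min_le_left _ _)

theorem foldl_min_le_mem (a : Int) (x : List Int) (cs : List (List Int)) (hx : x ∈ cs) :
    List.foldl (fun a x => min a (x.length : Int)) a cs ≤ (x.length : Int) := by
  induction cs generalizing a with
  | nil => cases hx
  | cons c cs ih =>
    simp only [List.foldl_cons]
    rcases List.mem_cons.mp hx with rfl | hx'
    · exact le_trans (foldl_min_le_init _ _) (min_le_right _ _)
    · exact ih _ hx'

theorem minLen_le_mem (c0 x : List Int) (cs : List (List Int)) (hx : x ∈ c0 :: cs) :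
    minLen c0 cs ≤ (x.length : Int) := by
  unfold minLen
  rcases List.mem_cons.mp hx with rfl | hx'
  · exact foldl_min_le_init _ _
  · exact foldl_min_le_mem _ _ _ hx'

theorem main_invariant (cs : List (List Int)) :
    ∀ (c0 : List Int) (pref : List (List Int)),
    cs.foldl stepA
      ((c0 :: pref).filter (fun x => decide ((x.length : Int) = minLen c0 pref)), minLen c0 pref)
    = ((c0 :: (pref ++ cs)).filter (fun x => decide ((x.length : Int) = minLen c0 (pref ++ cs))),
        minLen c0 (pref ++ cs)) := by
  induction cs with
  | nil => intro c0 pref; simp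
  | cons c cs ih =>
    intro c0 pref
    have hM : 0 ≤ minLen c0 pref := minLen_nonneg c0 pref
    simp only [List.foldl_cons]
    have hassoc : pref ++ c :: cs = (pref ++ [c]) ++ cs := by simp
    rw [hassoc]
    have hstep : stepA
        ((c0 :: pref).filter (fun x => decide ((x.length : Int) = minLen c0 pref)), minLen c0 pref) c
        = ((c0 :: (pref ++ [c])).filter
            (fun x => decide ((x.length : Int) = minLen c0 (pref ++ [c]))), minLen c0 (pref ++ [c])) := by
      unfold stepA
      have hne : ¬ (minLen c0 pref = -1) := by omega
      rcases lt_trichotomy ((c.length : Int)) (minLen c0 pref) with hlt | heq | hgt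
      · -- new strict minimum
        have hm : minLen c0 (pref ++ [c]) = (c.length : Int) := by
          rw [minLen_append]; exact min_eq_right (le_of_lt hlt)
        simp only [hne, hlt, if_pos, or_true, hm]
        have hfil : (c0 :: (pref ++ [c])).filter (fun x => decide ((x.length : Int) = (c.length : Int)))
            = [c] := by
          have : ∀ x ∈ c0 :: pref, ¬ ((x.length : Int) = (c.length : Int)) := by
            intro x hx
            have := minLen_le_mem c0 x pref hx
            omega
          rw [show c0 :: (pref ++ [c]) = (c0 :: pref) ++ [c] by simp, List.filter_append]
          rw [List.filter_eq_nil_iff.mpr (by intro x hx; simpa using this x hx)]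
          simp
        exact Prod.ext hfil.symm rfl
      · -- equal: append
        have hm : minLen c0 (pref ++ [c]) = minLen c0 pref := by
          rw [minLen_append, heq]; simp
        simp only [heq, hne, lt_irrefl, or_self, if_false, if_pos, hm]
        refine Prod.ext ?_ rfl
        rw [show c0 :: (pref ++ [c]) = (c0 :: pref) ++ [c] by simp, List.filter_append]
        simp [heq]
      · -- larger: unchanged
        have hm : minLen c0 (pref ++ [c]) = minLen c0 pref := by
          rw [minLen_append]; exact min_eq_left (le_of_lt hgt)
        have h1 : ¬ (minLen c0 pref = -1 ∨ (c.length : Int) < minLen c0 pref) := by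
          rintro (h | h) <;> omega
        have h2 : ¬ ((c.length : Int) = minLen c0 pref) := by omega
        simp only [h1, if_neg, h2, not_false_iff, hm]
        rw [show c0 :: (pref ++ [c]) = (c0 :: pref) ++ [c] by simp, List.filter_append]
        simp [h2]
    rw [hstep, ih]

-- ===== VERDICT (by name: the statement is the Claim_ definition above) =====
theorem minClauses_spec : Claim_equal_minClauses := by
  intro clauses _
  unfold Spec_minClauses minClauses minClauses_alt
  match clauses with
  | [] => rfl
  | c0 :: cs =>
    simp only [List.foldl_cons]
    have h0 : stepA ([], -1) c0
        = ((c0 :: ([] : List (List Int))).filter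
            (fun x => decide ((x.length : Int) = minLen c0 [])), minLen c0 []) := by
      unfold stepA minLen; simp
    rw [h0, main_invariant cs c0 []]
    simp only [List.nil_append]
    rfl
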